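-- pv_equiv track=rewrite | github.com/LRR19/Continuous_Integration_Project | task.py | invalid_hex_string
-- ===== SOURCE A (Python) =====
-- valid_hex_num = ['0', '1', '2', '3', '4', '5', '6', '7', '8', '9',
--                  'A', 'B', 'C', 'D', 'E', 'F', 'a', 'b', 'c', 'd', 'e', 'f']
--
-- def invalid_hex_string(hex_str):
--     if count_period(hex_str) > 1 or hex_str == '':
--         return True
--     if pos_hex_num(hex_str) is False and neg_hex_num(hex_str) is False:
--         for hex_digit in hex_str:
--             if valid_hex_digit(hex_digit):
--                 if valid_hex_num.index(hex_digit) > 9: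
--                     return True
--     count_x = 0
--     count_neg = 0
--     for digit in hex_str:
--         if digit == 'x':
--             count_x += 1
--         if digit == '-':
--             count_neg += 1
--     if count_x > 1 or count_neg > 1:
--         return True
--     return False
--
-- def count_period(hex_str):
--     count = 0
--     for char in hex_str:
--         if char == '.':
--             count += 1
--     return count
--
-- def valid_hex_digit(hex_digit):
--     if hex_digit in valid_hex_num:
--         return True
--     return False
--
-- def pos_hex_num(hex_str):
--     if hex_str.startswith('0x'):
--         return True
--     return False
--
-- def neg_hex_num(hex_str):
--     if hex_str.startswith('-0x'):
--         return True
--     return False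
-- ===== SOURCE B (Python) =====
-- def invalid_hex_string(hex_str):
--     if hex_str == '':
--         return True
--     freq = {}
--     for c in hex_str:
--         freq[c] = freq.get(c, 0) + 1
--     if freq.get('.', 0) > 1 or freq.get('x', 0) > 1 or freq.get('-', 0) > 1:
--         return True
--     if hex_str.startswith('0x') or hex_str.startswith('-0x'):
--         return False
--     return any(freq.get(c, 0) > 0 for c in 'ABCDEFabcdef')
-- ===== Notes on version B (the rewrite author's own statement) =====
-- stated objective: faster
-- what changed: B builds a character-frequency dictionary once and decides everything by lookups into it: the period/x/dash tests become three dict lookups, and the hex-letter test becomes twelve lookups (one per letter) instead of A's scan of the string with list.index; A's staged scans and early-return ladder disappear.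
import Mathlib
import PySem

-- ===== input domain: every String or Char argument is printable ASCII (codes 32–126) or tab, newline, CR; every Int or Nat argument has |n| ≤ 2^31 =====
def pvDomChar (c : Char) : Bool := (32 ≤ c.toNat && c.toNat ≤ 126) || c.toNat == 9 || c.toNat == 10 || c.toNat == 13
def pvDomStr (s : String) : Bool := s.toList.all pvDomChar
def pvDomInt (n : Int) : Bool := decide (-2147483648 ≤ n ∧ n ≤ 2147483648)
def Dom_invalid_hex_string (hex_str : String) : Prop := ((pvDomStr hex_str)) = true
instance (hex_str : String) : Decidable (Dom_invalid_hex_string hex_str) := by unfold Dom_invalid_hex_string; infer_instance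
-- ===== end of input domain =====

-- B replaces A's staged scans and early-return ladder by one character-frequency
-- dictionary built once; every test is then a dict lookup (objective: faster, measured; constant-factor).

-- ===== PORT A =====
def valid_hex_num : List Char :=
  ['0', '1', '2', '3', '4', '5', '6', '7', '8', '9',
   'A', 'B', 'C', 'D', 'E', 'F', 'a', 'b', 'c', 'd', 'e', 'f']

def count_period (hex_str : String) : Int :=
  hex_str.toList.foldl (fun count char => if char = '.' then count + 1 else count) 0

def valid_hex_digit (hex_digit : Char) : Bool :=
  if valid_hex_num.contains hex_digit then true else false

def pos_hex_num (hex_str : String) : Bool :=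
  if PySem.Str.startswith hex_str "0x" then true else false

def neg_hex_num (hex_str : String) : Bool :=
  if PySem.Str.startswith hex_str "-0x" then true else false

-- A's first for-loop with its early `return True`; the `.getD 0` is exact because the
-- index lookup is guarded by valid_hex_digit, so Python's list.index never raises here.
def hexLetterLoop : List Char → Bool
  | [] => false
  | c :: rest =>
    if valid_hex_digit c then
      if ((PySem.List.index? valid_hex_num c).getD 0) > 9 then true else hexLetterLoop rest
    else hexLetterLoop rest

def invalid_hex_string (hex_str : String) : Bool :=
  if count_period hex_str > 1 || hex_str == "" then true
  else if (pos_hex_num hex_str = false && neg_hex_num hex_str = false) && hexLetterLoop hex_str.toList then true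
  else
    let counts := hex_str.toList.foldl
      (fun (acc : Int × Int) digit =>
        (if digit = 'x' then acc.1 + 1 else acc.1,
         if digit = '-' then acc.2 + 1 else acc.2)) (0, 0)
    if counts.1 > 1 || counts.2 > 1 then true else false

-- ===== PORT B =====
def invalid_hex_string_alt (hex_str : String) : Bool :=
  if hex_str == "" then true
  else
    let freq : PySem.Dict Char Int :=
      hex_str.toList.foldl (fun d c => d.insert c (d.getD c 0 + 1)) PySem.Dict.empty
    if freq.getD '.' 0 > 1 || freq.getD 'x' 0 > 1 || freq.getD '-' 0 > 1 then true
    else if PySem.Str.startswith hex_str "0x" || PySem.Str.startswith hex_str "-0x" then false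
    else "ABCDEFabcdef".toList.any (fun c => freq.getD c 0 > 0)

-- ===== PRECONDITION & SPEC =====
def Spec_invalid_hex_string (hex_str : String) (out : Bool) : Prop := out = invalid_hex_string_alt hex_str
instance (hex_str : String) (out : Bool) : Decidable (Spec_invalid_hex_string hex_str out) := by unfold Spec_invalid_hex_string; infer_instance

-- ===== CLAIM (what is proved, stated in full; the proofs are below) =====
def Claim_equal_invalid_hex_string : Prop := ∀ (hex_str : String), Dom_invalid_hex_string hex_str → Spec_invalid_hex_string hex_str (invalid_hex_string hex_str)

-- ===== LEMMAS AND PROOFS =====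

def isHexLetter (c : Char) : Bool := "ABCDEFabcdef".toList.contains c

lemma hexLetters_eq : "ABCDEFabcdef".toList = ['A','B','C','D','E','F','a','b','c','d','e','f'] := by decide

lemma step_letter (c : Char) :
    (valid_hex_digit c && decide (((PySem.List.index? valid_hex_num c).getD 0) > 9)) = isHexLetter c := by
  by_cases hm : c ∈ valid_hex_num
  · simp only [valid_hex_num, List.mem_cons, List.not_mem_nil, or_false] at hm
    rcases hm with rfl | rfl | rfl | rfl | rfl | rfl | rfl | rfl | rfl | rfl | rfl | rfl |
      rfl | rfl | rfl | rfl | rfl | rfl | rfl | rfl | rfl | rfl <;> decide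
  · have h1 : valid_hex_digit c = false := by
      simp [valid_hex_digit, List.contains_eq_mem, hm]
    have h2 : isHexLetter c = false := by
      cases hl : isHexLetter c
      · rfl
      · exfalso
        unfold isHexLetter at hl
        rw [hexLetters_eq] at hl
        have hmem : c ∈ (['A','B','C','D','E','F','a','b','c','d','e','f'] : List Char) := by
          simpa using hl
        simp only [List.mem_cons, List.not_mem_nil, or_false] at hmem
        rcases hmem with rfl | rfl | rfl | rfl | rfl | rfl | rfl | rfl | rfl | rfl | rfl | rfl <;>
          exact hm (by decide)
    simp [h1, h2]

lemma hexLetterLoop_eq_any (l : List Char) : hexLetterLoop l = l.any isHexLetter := by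
  induction l with
  | nil => rfl
  | cons c rest ih =>
    have h := step_letter c
    unfold hexLetterLoop
    rw [List.any_cons, ← ih, ← h]
    by_cases hv : valid_hex_digit c = true <;>
      by_cases hd : ((PySem.List.index? valid_hex_num c).getD 0) > 9 <;>
        simp_all

-- A's period fold and x/- pair fold expressed as List.count
lemma count_period_eq (s : String) : count_period s = (s.toList.count '.' : Int) := by
  unfold count_period
  rw [PySem.List.foldl_ite_add_one]
  simp only [zero_add, Int.natCast_inj, List.count]
  exact List.countP_congr (fun a _ => by simp)

lemma pair_fold_eq (l : List Char) (x n : Int) :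
    l.foldl (fun (acc : Int × Int) digit =>
      (if digit = 'x' then acc.1 + 1 else acc.1,
       if digit = '-' then acc.2 + 1 else acc.2)) (x, n)
    = (x + (l.count 'x' : Int), n + (l.count '-' : Int)) := by
  induction l generalizing x n with
  | nil => simp
  | cons c rest ih =>
    simp only [List.foldl_cons, ih, List.count_cons]
    by_cases hx : c = 'x' <;> by_cases hn : c = '-' <;>
        simp_all [beq_iff_eq] <;> ring

-- B's frequency dict: every lookup is a count
lemma freq_getD (l : List Char) (v : Char) :
    (l.foldl (fun d c => d.insert c (d.getD c 0 + 1)) (PySem.Dict.empty : PySem.Dict Char Int)).getD v 0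
      = (l.count v : Int) := by
  rw [PySem.Dict.getD_foldl_insert_add_one]
  have : (PySem.Dict.empty : PySem.Dict Char Int).getD v 0 = 0 := rfl
  rw [this, zero_add]

-- presence of a hex letter, via per-letter counts vs scan of the string
lemma letters_any_eq (l : List Char) :
    ("ABCDEFabcdef".toList.any (fun c => decide ((l.count c : Int) > 0))) = l.any isHexLetter := by
  cases h : l.any isHexLetter
  · simp only [List.any_eq_false] at h
    simp only [List.any_eq_false]
    intro c hc
    simp only [decide_eq_true_eq, not_lt]
    have hlet : isHexLetter c = true := by
      simpa [isHexLetter, List.contains_eq_mem] using hc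
    have : l.count c = 0 := by
      rw [List.count_eq_zero]
      intro hcl
      exact absurd hlet (h c hcl)
    simp [this]
  · simp only [List.any_eq_true] at h
    obtain ⟨c, hcl, hc⟩ := h
    simp only [List.any_eq_true]
    refine ⟨c, ?_, ?_⟩
    · simpa [isHexLetter, List.contains_eq_mem] using hc
    · have : 0 < l.count c := List.count_pos_iff.mpr hcl
      simp only [decide_eq_true_eq]
      exact_mod_cast this
  
lemma bool_main (e p x n sw0 sw1 a : Bool) :
    (if (p || e) = true then true
     else if ((!sw0 && !sw1) && a) = true then true
     else (x || n))
    = (if e = true then true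
       else if (p || x || n) = true then true
       else if (sw0 || sw1) = true then false
       else a) := by
  cases e <;> cases p <;> cases x <;> cases n <;> cases sw0 <;> cases sw1 <;> cases a <;> rfl

-- ===== VERDICT (by name: the statement is the Claim_ definition above) =====
theorem invalid_hex_string_spec : Claim_equal_invalid_hex_string := by
  intro s _
  show invalid_hex_string s = invalid_hex_string_alt s
  unfold invalid_hex_string invalid_hex_string_alt
  simp only [pair_fold_eq, freq_getD, hexLetterLoop_eq_any, count_period_eq,
    pos_hex_num, neg_hex_num, zero_add]
  rw [letters_any_eq]
  have hb : ∀ b : Bool, (if b = true then true else false) = b := fun b => by cases b <;> rfl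
  have h2 : ∀ b : Bool, decide (b = false) = !b := fun b => by cases b <;> rfl
  simp only [hb, h2]
  exact bool_main _ _ _ _ _ _ _
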